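-- pv_equiv track=rewrite | github.com/rafaelperazzo/programacao-web | moodledata/vpl_data/331/usersdata/299/94144/submittedfiles/funcoes1.py | iguais
-- ===== SOURCE A (Python) =====
-- def iguais(lista):
--     cont=0
--     for i in range(1,len(lista),1):
--         if lista[i-1]==lista[i]:
--             cont+=1
--         else:
--             cont=0
--     if cont==0:
--         return('N')
--     else:
--         return('S')
-- ===== SOURCE B (Python) =====
-- def iguais(lista):
--     if len(lista) >= 2 and lista[-2] == lista[-1]:
--         return 'S'
--     return 'N'
-- ===== Notes on version B (the rewrite author's own statement) =====
-- stated objective: simpler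
-- what changed: A's counter is reset on every mismatch, so only the final adjacent pair determines the answer; B drops the whole loop and returns 'S' exactly when the list has at least two elements and its last two elements are equal.
import Mathlib
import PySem

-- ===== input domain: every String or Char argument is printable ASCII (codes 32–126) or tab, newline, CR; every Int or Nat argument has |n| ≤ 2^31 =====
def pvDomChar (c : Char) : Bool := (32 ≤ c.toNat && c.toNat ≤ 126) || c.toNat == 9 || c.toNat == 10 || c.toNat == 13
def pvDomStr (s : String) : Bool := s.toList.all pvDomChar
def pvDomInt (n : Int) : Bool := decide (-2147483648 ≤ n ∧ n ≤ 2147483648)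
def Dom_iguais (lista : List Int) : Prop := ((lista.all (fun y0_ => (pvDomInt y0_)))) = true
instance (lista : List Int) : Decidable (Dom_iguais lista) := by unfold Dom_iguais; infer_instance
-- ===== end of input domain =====

-- B replaces A's full counter scan by a single comparison of the last two elements (simpler).

-- ===== PORT A =====
def iguais (lista : List Int) : String :=
  let cont : Int :=
    (PySem.List.pyRange 1 (lista.length : Int) 1).foldl
      (fun cont i =>
        if PySem.List.pyGetD lista (i - 1) 0 = PySem.List.pyGetD lista i 0 then cont + 1 else 0)
      0
  if cont = 0 then "N" else "S"

-- ===== PORT B =====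
def iguais_alt (lista : List Int) : String :=
  if 2 ≤ lista.length ∧ PySem.List.pyGetD lista (-2) 0 = PySem.List.pyGetD lista (-1) 0 then "S"
  else "N"

-- ===== PRECONDITION & SPEC =====
def Spec_iguais (lista : List Int) (out : String) : Prop := out = iguais_alt lista
instance (lista : List Int) (out : String) : Decidable (Spec_iguais lista out) := by unfold Spec_iguais; infer_instance

-- ===== CLAIM (what is proved, stated in full; the proofs are below) =====
def Claim_equal_iguais : Prop := ∀ (lista : List Int), Dom_iguais lista → Spec_iguais lista (iguais lista)

-- ===== LEMMAS AND PROOFS =====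

-- the counter stays nonnegative through A's loop
theorem iguais_cont_nonneg (lista : List Int) (l : List Int) (init : Int) (h : 0 ≤ init) :
    0 ≤ l.foldl
      (fun cont i =>
        if PySem.List.pyGetD lista (i - 1) 0 = PySem.List.pyGetD lista i 0 then cont + 1 else 0)
      init := by
  induction l generalizing init with
  | nil => exact h
  | cons x xs ih =>
    simp only [List.foldl_cons]
    split <;> [exact ih _ (by omega); exact ih _ (by omega)]

-- ===== VERDICT (by name: the statement is the Claim_ definition above) =====
theorem iguais_spec : Claim_equal_iguais := by
  intro lista _
  unfold Spec_iguais iguais iguais_alt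
  by_cases hlen : 2 ≤ lista.length
  · have h1 : (1 : Int) ≤ (lista.length : Int) - 1 := by omega
    have hsplit : PySem.List.pyRange 1 (lista.length : Int) 1
        = PySem.List.pyRange 1 ((lista.length : Int) - 1) 1 ++ [(lista.length : Int) - 1] := by
      have h2 := PySem.List.pyRange_one_succ_right h1
      rw [show ((lista.length : Int) - 1) + 1 = (lista.length : Int) by omega] at h2
      exact h2
    rw [hsplit, List.foldl_append]
    simp only [List.foldl_cons, List.foldl_nil]
    have hA2 : PySem.List.pyGetD lista ((lista.length : Int) - 1 - 1) 0
        = PySem.List.pyGetD lista (-2) 0 := by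
      rw [PySem.List.pyGetD_eq_getElem lista 0 (by omega) (by omega),
          PySem.List.pyGetD_neg_ofNat lista 2 0 (by omega) hlen]
      congr 1
      omega
    have hA1 : PySem.List.pyGetD lista ((lista.length : Int) - 1) 0
        = PySem.List.pyGetD lista (-1) 0 := by
      rw [PySem.List.pyGetD_eq_getElem lista 0 (by omega) (by omega),
          PySem.List.pyGetD_neg_ofNat lista 1 0 (by omega) (by omega)]
      congr 1
      omega
    by_cases heq : PySem.List.pyGetD lista (-2) 0 = PySem.List.pyGetD lista (-1) 0
    · have hnn := iguais_cont_nonneg lista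
        (PySem.List.pyRange 1 ((lista.length : Int) - 1) 1) 0 le_rfl
      simp [hA2, hA1, heq, hlen]
      omega
    · simp [hA2, hA1, heq, hlen]
  · have hnil : PySem.List.pyRange 1 (lista.length : Int) 1 = [] :=
      PySem.List.pyRange_one_eq_nil (by omega)
    rw [hnil]
    simp [hlen]
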